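-- pv_equiv track=rewrite | github.com/pj4533/autoresearch-arcagi3 | src/arcagi3/stategraph_agent/agent.py | _find_color9_buttons
-- ===== SOURCE A (Python) =====
-- from typing import Any, Dict, List, Optional
--
-- def _find_color9_buttons(grid: List[List[int]]) -> List[tuple]:
--     """Find all color 9 button blocks via BFS. Returns list of (cx, cy) centers."""
--     rows = len(grid)
--     cols = len(grid[0]) if rows else 0
--     buttons = []
--     visited = set()
--     for r in range(1, rows - 1):
--         for c in range(cols):
--             if grid[r][c] == 9 and (r, c) not in visited:
--                 component = []
--                 q = [(r, c)]
--                 visited.add((r, c))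
--                 while q:
--                     cr, cc = q.pop(0)
--                     component.append((cc, cr))
--                     for dr, dc in [(-1, 0), (1, 0), (0, -1), (0, 1)]:
--                         nr, nc = cr + dr, cc + dc
--                         if 1 <= nr < rows - 1 and 0 <= nc < cols and (nr, nc) not in visited and grid[nr][nc] == 9:
--                             visited.add((nr, nc))
--                             q.append((nr, nc))
--                 cx = sum(p[0] for p in component) // len(component)
--                 cy = sum(p[1] for p in component) // len(component)
--                 buttons.append((cx, cy))
--     return buttons
-- ===== SOURCE B (Python) =====
-- def _find_color9_buttons(grid):
--     """Find all color 9 button blocks by iterated set expansion (fixpoint flood).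
--
--     Same result as the BFS version: for each unseen interior color-9 cell in
--     row-major order, grow its full connected component to a fixpoint, then
--     emit the (cx, cy) centroid with floor division.
--     """
--     rows = len(grid)
--     cols = len(grid[0]) if rows else 0
--     seen = set()
--     buttons = []
--     for r in range(1, rows - 1):
--         for c in range(cols):
--             if grid[r][c] == 9 and (r, c) not in seen:
--                 comp = {(r, c)}
--                 while True:
--                     grown = comp | {
--                         (nr, nc)
--                         for (cr, cc) in comp
--                         for (nr, nc) in ((cr - 1, cc), (cr + 1, cc), (cr, cc - 1), (cr, cc + 1))
--                         if 1 <= nr < rows - 1 and 0 <= nc < cols and grid[nr][nc] == 9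
--                     }
--                     if grown == comp:
--                         break
--                     comp = grown
--                 n = len(comp)
--                 buttons.append((sum(cc for _, cc in comp) // n, sum(cr for cr, _ in comp) // n))
--                 seen |= comp
--     return buttons
-- ===== Notes on version B (the rewrite author's own statement) =====
-- stated objective: alternative
-- what changed: Replaced the FIFO-queue BFS with per-cell visited bookkeeping by an iterated whole-set expansion (flood to a fixpoint) of each component, merging the finished component into the seen set at once; centroids are computed from the component set.
import Mathlib
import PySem

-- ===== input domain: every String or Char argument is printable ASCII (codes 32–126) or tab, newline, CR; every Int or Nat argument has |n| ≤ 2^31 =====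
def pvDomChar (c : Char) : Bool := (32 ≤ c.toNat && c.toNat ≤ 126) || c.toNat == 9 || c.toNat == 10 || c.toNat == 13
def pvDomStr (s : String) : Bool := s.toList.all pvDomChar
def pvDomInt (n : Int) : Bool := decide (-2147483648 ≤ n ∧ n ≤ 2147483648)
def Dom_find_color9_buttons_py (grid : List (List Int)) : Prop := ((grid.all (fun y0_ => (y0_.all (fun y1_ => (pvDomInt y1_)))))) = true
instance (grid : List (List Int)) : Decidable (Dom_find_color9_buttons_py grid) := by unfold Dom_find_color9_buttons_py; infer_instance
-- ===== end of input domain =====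

-- B replaces the FIFO-queue BFS by an iterated set-expansion flood to a fixpoint per
-- component (objective: alternative, same result, no speed claim).

-- shared accessors (closure variables of the Python code): number of columns and a cell read
def pvCols (grid : List (List Int)) : Int :=
  if (grid.length : Int) ≠ 0 then ((PySem.List.pyGetD grid 0 []).length : Int) else 0

def pvCell (grid : List (List Int)) (r c : Int) : Int :=
  PySem.List.pyGetD (PySem.List.pyGetD grid r []) c 0

-- ===== PORT A =====
-- one neighbour test of the BFS inner loop: '1 <= nr < rows-1 and 0 <= nc < cols and (nr,nc) not in visited and grid[nr][nc] == 9'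
def pvStep (grid : List (List Int)) (cr cc : Int)
    (st : PySem.Set (Int × Int) × List (Int × Int)) (d : Int × Int) :
    PySem.Set (Int × Int) × List (Int × Int) :=
  let nr := cr + d.1
  let nc := cc + d.2
  if 1 ≤ nr ∧ nr < (grid.length : Int) - 1 ∧ 0 ≤ nc ∧ nc < pvCols grid ∧
      ¬ ((nr, nc) ∈ st.1) ∧ pvCell grid nr nc = 9 then
    (PySem.Set.add st.1 (nr, nc), st.2 ++ [(nr, nc)])
  else st

-- the 'while q:' loop, with a fuel guard for totality
def pvBfs (grid : List (List Int)) :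
    Nat → List (Int × Int) → PySem.Set (Int × Int) → List (Int × Int) →
    List (Int × Int) × PySem.Set (Int × Int)
  | 0, _, visited, component => (component, visited)
  | _ + 1, [], visited, component => (component, visited)
  | fuel + 1, (cr, cc) :: qrest, visited, component =>
    let component := component ++ [(cc, cr)]
    let st := [((-1 : Int), (0 : Int)), (1, 0), (0, -1), (0, 1)].foldl
        (pvStep grid cr cc) (visited, qrest)
    pvBfs grid fuel st.2 st.1 component

def find_color9_buttons_py (grid : List (List Int)) : List (Int × Int) :=
  let rows : Int := grid.length
  let cols : Int := pvCols grid
  let res := (PySem.List.pyRange 1 (rows - 1) 1).foldl (fun st r =>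
    (PySem.List.pyRange 0 cols 1).foldl (fun st c =>
      if pvCell grid r c = 9 ∧ ¬ ((r, c) ∈ st.2) then
        let bfs := pvBfs grid ((rows * cols).toNat + 1) [(r, c)]
            (PySem.Set.add st.2 (r, c)) []
        let component := bfs.1
        let n : Int := component.length
        let cx := PySem.Int.floordiv (component.map (fun p => p.1)).sum n
        let cy := PySem.Int.floordiv (component.map (fun p => p.2)).sum n
        (st.1 ++ [(cx, cy)], bfs.2)
      else st) st)
    (([] : List (Int × Int)), (PySem.Set.empty : PySem.Set (Int × Int)))
  res.1

-- ===== PORT B =====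
-- the four neighbours of a cell
def pvNbrs (p : Int × Int) : List (Int × Int) :=
  [(p.1 - 1, p.2), (p.1 + 1, p.2), (p.1, p.2 - 1), (p.1, p.2 + 1)]

-- one expansion: comp | { in-range colour-9 neighbours of comp }
def pvGrown (grid : List (List Int)) (comp : PySem.Set (Int × Int)) : PySem.Set (Int × Int) :=
  PySem.Set.union comp
    ((comp.flatMap pvNbrs).filter (fun q =>
      decide (1 ≤ q.1 ∧ q.1 < (grid.length : Int) - 1 ∧ 0 ≤ q.2 ∧ q.2 < pvCols grid ∧
        pvCell grid q.1 q.2 = 9)))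

-- the 'while True:' fixpoint loop, with a fuel guard for totality
def pvGrow (grid : List (List Int)) : Nat → PySem.Set (Int × Int) → PySem.Set (Int × Int)
  | 0, comp => comp
  | fuel + 1, comp =>
    let grown := pvGrown grid comp
    if PySem.Set.equal grown comp then comp else pvGrow grid fuel grown

def find_color9_buttons_py_alt (grid : List (List Int)) : List (Int × Int) :=
  let rows : Int := grid.length
  let cols : Int := pvCols grid
  let res := (PySem.List.pyRange 1 (rows - 1) 1).foldl (fun st r =>
    (PySem.List.pyRange 0 cols 1).foldl (fun st c =>
      if pvCell grid r c = 9 ∧ ¬ ((r, c) ∈ st.2) then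
        let comp := pvGrow grid ((rows * cols).toNat + 1)
            (PySem.Set.add PySem.Set.empty (r, c))
        let n : Int := PySem.Set.len comp
        let cx := PySem.Int.floordiv (comp.map (fun p => p.2)).sum n
        let cy := PySem.Int.floordiv (comp.map (fun p => p.1)).sum n
        (st.1 ++ [(cx, cy)], PySem.Set.union st.2 comp)
      else st) st)
    (([] : List (Int × Int)), (PySem.Set.empty : PySem.Set (Int × Int)))
  res.1

-- ===== PRECONDITION & SPEC =====
-- Pre_ excludes exactly the ragged grids on which A raises IndexError: some interior row
-- (rows 0 and rows-1 are never read) shorter than row 0, whose length is 'cols'.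
def Pre_find_color9_buttons_py (grid : List (List Int)) : Prop :=
  ∀ row ∈ (grid.drop 1).dropLast, (grid.headD []).length ≤ row.length

instance (grid : List (List Int)) : Decidable (Pre_find_color9_buttons_py grid) := by
  unfold Pre_find_color9_buttons_py; infer_instance

def pvWitness_find_color9_buttons_py : List (List Int) := [[0], [9], [0]]

def Spec_find_color9_buttons_py (grid : List (List Int)) (out : List (Int × Int)) : Prop := out = find_color9_buttons_py_alt grid
instance (grid : List (List Int)) (out : List (Int × Int)) : Decidable (Spec_find_color9_buttons_py grid out) := by unfold Spec_find_color9_buttons_py; infer_instance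

-- ===== CLAIM (what is proved, stated in full; the proofs are below) =====
def Claim_equal_find_color9_buttons_py : Prop := ∀ (grid : List (List Int)), Dom_find_color9_buttons_py grid → Pre_find_color9_buttons_py grid → Spec_find_color9_buttons_py grid (find_color9_buttons_py grid)

-- ===== LEMMAS AND PROOFS =====

-- a cell is a valid button cell: interior row, in-range column, colour 9
def pvOk (grid : List (List Int)) (p : Int × Int) : Prop :=
  1 ≤ p.1 ∧ p.1 < (grid.length : Int) - 1 ∧ 0 ≤ p.2 ∧ p.2 < pvCols grid ∧
    pvCell grid p.1 p.2 = 9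

def pvAdj (grid : List (List Int)) (p q : Int × Int) : Prop :=
  pvOk grid p ∧ pvOk grid q ∧ q ∈ pvNbrs p

def pvReach (grid : List (List Int)) (s p : Int × Int) : Prop :=
  Relation.ReflTransGen (pvAdj grid) s p

-- all valid cells, as a finite set
noncomputable def pvAll (grid : List (List Int)) : Finset (Int × Int) :=
  (Finset.Icc (1 : Int) ((grid.length : Int) - 2) ×ˢ Finset.Icc (0 : Int) (pvCols grid - 1)).filter
    (fun p => pvCell grid p.1 p.2 = 9)

-- the connected component of a seed
noncomputable def pvComp (grid : List (List Int)) (s : Int × Int) : Finset (Int × Int) :=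
  @Finset.filter _ (fun p => pvReach grid s p) (fun _ => Classical.propDecidable _) (pvAll grid)

-- position swap: A's component list stores (col, row)
def pvSw (p : Int × Int) : Int × Int := (p.2, p.1)

lemma mem_pvAll (grid : List (List Int)) (p : Int × Int) :
    p ∈ pvAll grid ↔ pvOk grid p := by
  simp [pvAll, pvOk, Finset.mem_filter, Finset.mem_product, Finset.mem_Icc]
  omega

lemma pvNbrs_symm (p q : Int × Int) : q ∈ pvNbrs p → p ∈ pvNbrs q := by
  rcases p with ⟨a, b⟩; rcases q with ⟨c, d⟩
  simp [pvNbrs, Prod.ext_iff]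
  omega

lemma pvAdj_symm (grid : List (List Int)) : Symmetric (pvAdj grid) := by
  rintro p q ⟨hp, hq, hn⟩
  exact ⟨hq, hp, pvNbrs_symm _ _ hn⟩

lemma pvReach_symm (grid : List (List Int)) {p q : Int × Int} :
    pvReach grid p q → pvReach grid q p :=
  fun h => Relation.ReflTransGen.symmetric (pvAdj_symm grid) h

lemma pvReach_ok (grid : List (List Int)) {s x : Int × Int} (hs : pvOk grid s)
    (h : pvReach grid s x) : pvOk grid x := by
  induction h with
  | refl => exact hs
  | tail _ hadj _ => exact hadj.2.1

lemma mem_pvComp (grid : List (List Int)) {s : Int × Int} (hs : pvOk grid s) (x : Int × Int) :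
    x ∈ pvComp grid s ↔ pvReach grid s x := by
  unfold pvComp
  rw [@Finset.mem_filter _ (fun p => pvReach grid s p) (fun _ => Classical.propDecidable _),
    mem_pvAll]
  exact ⟨fun h => h.2, fun h => ⟨pvReach_ok grid hs h, h⟩⟩

lemma self_mem_pvComp (grid : List (List Int)) {s : Int × Int} (hs : pvOk grid s) :
    s ∈ pvComp grid s := (mem_pvComp grid hs s).2 Relation.ReflTransGen.refl

lemma pvComp_closed (grid : List (List Int)) {s x n : Int × Int} (hs : pvOk grid s)
    (hx : x ∈ pvComp grid s) (h : pvAdj grid x n) : n ∈ pvComp grid s :=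
  (mem_pvComp grid hs n).2 (((mem_pvComp grid hs x).1 hx).tail h)

-- effect of the four-direction inner loop of A's BFS on (visited, queue)
lemma pvStep_fold (grid : List (List Int)) (cr cc : Int) :
    ∀ (ds : List (Int × Int)) (V : PySem.Set (Int × Int)) (q : List (Int × Int)),
    (ds.map (fun d => (cr + d.1, cc + d.2))).Nodup →
    ∃ fresh : List (Int × Int),
      ds.foldl (pvStep grid cr cc) (V, q) = (V ++ fresh, q ++ fresh) ∧
      fresh.Nodup ∧
      ∀ n, n ∈ fresh ↔ n ∈ ds.map (fun d => (cr + d.1, cc + d.2)) ∧ pvOk grid n ∧ n ∉ V := by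
  intro ds
  induction ds with
  | nil => intro V q _; exact ⟨[], by simp, by simp, by simp⟩
  | cons d rest ih =>
    intro V q hnd
    simp only [List.map_cons, List.nodup_cons] at hnd
    obtain ⟨hd0, hndrest⟩ := hnd
    by_cases hc : pvOk grid (cr + d.1, cc + d.2) ∧ (cr + d.1, cc + d.2) ∉ V
    · have hstep : pvStep grid cr cc (V, q) d =
          (V ++ [(cr + d.1, cc + d.2)], q ++ [(cr + d.1, cc + d.2)]) := by
        have hcond : 1 ≤ cr + d.1 ∧ cr + d.1 < (grid.length : Int) - 1 ∧ 0 ≤ cc + d.2 ∧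
            cc + d.2 < pvCols grid ∧ ¬ ((cr + d.1, cc + d.2) ∈ V) ∧
            pvCell grid (cr + d.1) (cc + d.2) = 9 := by
          obtain ⟨⟨h1, h2, h3, h4, h5⟩, h6⟩ := hc
          exact ⟨h1, h2, h3, h4, h6, h5⟩
        simp only [pvStep, if_pos hcond]
        rw [PySem.Set.add_of_not_mem hc.2]
      obtain ⟨fresh, heq, hfnd, hfmem⟩ := ih (V ++ [(cr + d.1, cc + d.2)])
        (q ++ [(cr + d.1, cc + d.2)]) hndrest
      refine ⟨(cr + d.1, cc + d.2) :: fresh, ?_, ?_, ?_⟩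
      · simp only [List.foldl_cons, hstep, heq, List.append_assoc, List.singleton_append]
      · refine List.nodup_cons.2 ⟨fun hmem => ?_, hfnd⟩
        exact hd0 ((hfmem _).1 hmem).1
      · intro n
        rw [List.mem_cons, hfmem n]
        constructor
        · rintro (rfl | ⟨hm, hok, hnv⟩)
          · exact ⟨List.mem_cons_self .., hc.1, hc.2⟩
          · refine ⟨List.mem_cons_of_mem _ hm, hok, fun h => hnv (by simp [h])⟩
        · rintro ⟨hm, hok, hnv⟩
          rcases List.mem_cons.1 hm with rfl | hm
          · exact Or.inl rfl
          · refine Or.inr ⟨hm, hok, ?_⟩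
            simp only [List.mem_append, List.mem_singleton]
            rintro (h | rfl)
            · exact hnv h
            · exact hd0 hm
    · have hstep1 : pvStep grid cr cc (V, q) d = (V, q) := by
        simp only [pvStep]
        rw [if_neg]
        intro ⟨h1, h2, h3, h4, h5, h6⟩
        exact hc ⟨⟨h1, h2, h3, h4, h6⟩, h5⟩
      obtain ⟨fresh, heq, hfnd, hfmem⟩ := ih V q hndrest
      refine ⟨fresh, ?_, hfnd, ?_⟩
      · simp only [List.foldl_cons, hstep1, heq]
      · intro n
        rw [hfmem n]
        constructor
        · rintro ⟨hm, hok, hnv⟩; exact ⟨List.mem_cons_of_mem _ hm, hok, hnv⟩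
        · rintro ⟨hm, hok, hnv⟩
          rcases List.mem_cons.1 hm with rfl | hm
          · exact absurd ⟨hok, hnv⟩ hc
          · exact ⟨hm, hok, hnv⟩

lemma pvOk_of_mem_pvComp (grid : List (List Int)) {s x : Int × Int}
    (h : x ∈ pvComp grid s) : pvOk grid x := by
  unfold pvComp at h
  rw [@Finset.mem_filter _ (fun p => pvReach grid s p) (fun _ => Classical.propDecidable _)] at h
  exact (mem_pvAll grid x).1 h.1

-- invariant of A's BFS loop: it collects exactly the component of the seed
set_option maxHeartbeats 1600000 in
lemma pvBfs_invariant (grid : List (List Int)) (s : Int × Int) (P0 : Int × Int → Prop)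
    (hs : pvOk grid s) :
    ∀ (fuel : Nat) (q : List (Int × Int)) (V : PySem.Set (Int × Int))
      (comp : List (Int × Int)),
    ((pvComp grid s \ (comp.map pvSw ++ q).toFinset).card + q.length) < fuel →
    (∀ p ∈ q, p ∈ pvComp grid s) →
    (∀ p ∈ comp.map pvSw, p ∈ pvComp grid s) →
    (comp.map pvSw ++ q).Nodup →
    (∀ x, x ∈ V ↔ P0 x ∨ x ∈ comp.map pvSw ∨ x ∈ q) →
    (∀ x ∈ pvComp grid s, ¬ P0 x) →
    (∀ p ∈ comp.map pvSw, ∀ n, pvAdj grid p n → n ∈ V) →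
    (s ∈ comp.map pvSw ∨ s ∈ q) →
    ((pvBfs grid fuel q V comp).1.map pvSw).Nodup ∧
    ((pvBfs grid fuel q V comp).1.map pvSw).toFinset = pvComp grid s ∧
    (∀ x, x ∈ (pvBfs grid fuel q V comp).2 ↔ P0 x ∨ x ∈ pvComp grid s) := by
  intro fuel
  induction fuel with
  | zero => intro q V comp hfuel _ _ _ _ _ _ _; omega
  | succ fuel ih =>
    intro q V comp hfuel hq hcomp hnodup hV hdisj hclosed hseed
    match q with
    | [] =>
      have hcover : ∀ x, pvReach grid s x → x ∈ comp.map pvSw := by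
        intro x hx
        induction hx with
        | refl => simpa using hseed
        | tail hr hadj ihx =>
          rename_i b c
          have hcV := hclosed b ihx c hadj
          rcases (hV c).1 hcV with h0 | hcp | hcq
          · exact absurd h0 (hdisj c (pvComp_closed grid hs
              ((hcomp b ihx)) hadj))
          · exact hcp
          · simp at hcq
      have hset : (comp.map pvSw).toFinset = pvComp grid s := by
        apply Finset.Subset.antisymm
        · intro x hx
          exact hcomp x (List.mem_toFinset.1 hx)
        · intro x hx
          exact List.mem_toFinset.2 (hcover x ((mem_pvComp grid hs x).1 hx))
      refine ⟨by simpa using hnodup, hset, ?_⟩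
      intro x
      rw [show (pvBfs grid (fuel+1) [] V comp).2 = V from rfl, hV x]
      constructor
      · rintro (h0 | hcp | hq')
        · exact Or.inl h0
        · exact Or.inr (hcomp x hcp)
        · simp at hq'
      · rintro (h0 | hc)
        · exact Or.inl h0
        · exact Or.inr (Or.inl (hcover x ((mem_pvComp grid hs x).1 hc)))
    | (cr, cc) :: qrest =>
      have hp : (cr, cc) ∈ pvComp grid s := hq _ (List.mem_cons_self ..)
      have hpok : pvOk grid (cr, cc) := pvOk_of_mem_pvComp grid hp
      have hndpos : ([((-1:Int),(0:Int)),(1,0),(0,-1),(0,1)].map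
          (fun d => (cr + d.1, cc + d.2))).Nodup := by
        simp [List.nodup_cons, Prod.ext_iff]
        try omega
      obtain ⟨fresh, heq, hfnd, hfmem0⟩ := pvStep_fold grid cr cc _ V qrest hndpos
      have hposs : ([((-1:Int),(0:Int)),(1,0),(0,-1),(0,1)].map
          (fun d => (cr + d.1, cc + d.2))) = pvNbrs (cr, cc) := by
        simp [pvNbrs, Prod.ext_iff]
        omega
      rw [hposs] at hfmem0
      have hfmem : ∀ n, n ∈ fresh ↔ n ∈ pvNbrs (cr, cc) ∧ pvOk grid n ∧ n ∉ V := hfmem0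
      have hfreshC : ∀ n ∈ fresh, n ∈ pvComp grid s := by
        intro n hn
        obtain ⟨hnb, hok, _⟩ := (hfmem n).1 hn
        exact pvComp_closed grid hs hp ⟨hpok, hok, hnb⟩
      have hfreshV : ∀ n ∈ fresh, n ∉ V := fun n hn => ((hfmem n).1 hn).2.2
      have hinV : ∀ x ∈ comp.map pvSw ++ (cr, cc) :: qrest, x ∈ V := by
        intro x hx
        rcases List.mem_append.1 hx with h | h
        · exact (hV x).2 (Or.inr (Or.inl h))
        · exact (hV x).2 (Or.inr (Or.inr h))
      -- unfold one BFS step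
      have hunf : pvBfs grid (fuel+1) ((cr, cc) :: qrest) V comp =
          pvBfs grid fuel (qrest ++ fresh) (V ++ fresh) (comp ++ [(cc, cr)]) := by
        show pvBfs grid fuel
          ([((-1:Int),(0:Int)),(1,0),(0,-1),(0,1)].foldl (pvStep grid cr cc) (V, qrest)).2
          ([((-1:Int),(0:Int)),(1,0),(0,-1),(0,1)].foldl (pvStep grid cr cc) (V, qrest)).1
          (comp ++ [(cc, cr)]) = _
        rw [heq]
      rw [hunf]
      have hsw : (comp ++ [(cc, cr)]).map pvSw = comp.map pvSw ++ [(cr, cc)] := by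
        simp [pvSw]
      -- measure bookkeeping
      have hTsub : fresh.toFinset ⊆ pvComp grid s \ (comp.map pvSw ++ (cr, cc) :: qrest).toFinset := by
        intro x hx
        have hxf := List.mem_toFinset.1 hx
        refine Finset.mem_sdiff.2 ⟨hfreshC x hxf, fun hmem => ?_⟩
        exact hfreshV x hxf (hinV x (List.mem_toFinset.1 hmem))
      have hT' : pvComp grid s \ ((comp ++ [(cc, cr)]).map pvSw ++ (qrest ++ fresh)).toFinset =
          (pvComp grid s \ (comp.map pvSw ++ (cr, cc) :: qrest).toFinset) \ fresh.toFinset := by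
        rw [hsw]
        ext x
        simp only [Finset.mem_sdiff, List.mem_toFinset, List.mem_append, List.mem_cons]
        tauto
      have hcard : (pvComp grid s \ ((comp ++ [(cc, cr)]).map pvSw ++ (qrest ++ fresh)).toFinset).card
          + fresh.length = (pvComp grid s \ (comp.map pvSw ++ (cr, cc) :: qrest).toFinset).card := by
        rw [hT', Finset.card_sdiff, Finset.inter_eq_left.2 hTsub,
          List.toFinset_card_of_nodup hfnd]
        have := Finset.card_le_card hTsub
        rw [List.toFinset_card_of_nodup hfnd] at this
        omega
      refine ih (qrest ++ fresh) (V ++ fresh) (comp ++ [(cc, cr)]) ?_ ?_ ?_ ?_ ?_ hdisj ?_ ?_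
      · simp only [List.length_append]
        simp only [List.length_cons] at hfuel
        omega
      · intro p hp'
        rcases List.mem_append.1 hp' with h | h
        · exact hq p (List.mem_cons_of_mem _ h)
        · exact hfreshC p h
      · rw [hsw]
        intro p hp'
        rcases List.mem_append.1 hp' with h | h
        · exact hcomp p h
        · simp at h; subst h; exact hp
      · rw [hsw]
        have hperm : (comp.map pvSw ++ [(cr, cc)] ++ (qrest ++ fresh)) =
            (comp.map pvSw ++ (cr, cc) :: qrest) ++ fresh := by
          simp
        rw [hperm, List.nodup_append]
        refine ⟨hnodup, hfnd, ?_⟩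
        intro x hx y hy hxy
        exact hfreshV y hy (hinV y (hxy ▸ hx))
      · intro x
        rw [hsw]
        simp only [List.mem_append, List.mem_cons, List.not_mem_nil, or_false]
        rw [hV x]
        simp only [List.mem_cons, or_assoc]
      · rw [hsw]
        intro a ha n hadj
        rw [List.mem_append] at ha
        rcases ha with h | h
        · exact List.mem_append.2 (Or.inl (hclosed a h n hadj))
        · simp at h; subst h
          by_cases hnv : n ∈ V
          · exact List.mem_append.2 (Or.inl hnv)
          · refine List.mem_append.2 (Or.inr ((hfmem n).2 ⟨hadj.2.2, hadj.2.1, hnv⟩))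
      · rw [hsw]
        simp only [List.mem_append, List.mem_cons]
        rcases hseed with h | h
        · exact Or.inl (Or.inl h)
        · rcases List.mem_cons.1 h with h | h
          · exact Or.inl (Or.inr (by simp [h]))
          · exact Or.inr (Or.inl h)

lemma mem_pvGrown (grid : List (List Int)) (comp : PySem.Set (Int × Int)) (x : Int × Int) :
    x ∈ pvGrown grid comp ↔ x ∈ comp ∨ ∃ p ∈ comp, x ∈ pvNbrs p ∧ pvOk grid x := by
  unfold pvGrown
  rw [PySem.Set.mem_union]
  simp only [List.mem_filter, List.mem_flatMap, decide_eq_true_eq]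
  unfold pvOk
  constructor
  · rintro (h | ⟨⟨p, hp, hn⟩, hok⟩)
    · exact Or.inl h
    · exact Or.inr ⟨p, hp, hn, hok⟩
  · rintro (h | ⟨p, hp, hn, hok⟩)
    · exact Or.inl h
    · exact Or.inr ⟨⟨p, hp, hn⟩, hok⟩

-- invariant of B's fixpoint loop: it computes exactly the component of the seed
lemma pvGrow_invariant (grid : List (List Int)) (s : Int × Int) (hs : pvOk grid s) :
    ∀ (fuel : Nat) (comp : PySem.Set (Int × Int)),
    (pvComp grid s \ comp.toFinset).card < fuel →
    comp.Nodup → (∀ p ∈ comp, p ∈ pvComp grid s) → s ∈ comp →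
    (pvGrow grid fuel comp).Nodup ∧
    (∀ x, x ∈ pvGrow grid fuel comp ↔ x ∈ pvComp grid s) := by
  intro fuel
  induction fuel with
  | zero => intro comp hfuel _ _ _; omega
  | succ fuel ih =>
    intro comp hfuel hnd hsub hseed
    have hgsub : ∀ x ∈ pvGrown grid comp, x ∈ pvComp grid s := by
      intro x hx
      rcases (mem_pvGrown grid comp x).1 hx with h | ⟨p, hp, hnb, hokx⟩
      · exact hsub x h
      · exact pvComp_closed grid hs (hsub p hp)
          ⟨pvOk_of_mem_pvComp grid (hsub p hp), hokx, hnb⟩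
    have hmono : ∀ x ∈ comp, x ∈ pvGrown grid comp :=
      fun x hx => (mem_pvGrown grid comp x).2 (Or.inl hx)
    have hred : pvGrow grid (fuel + 1) comp =
        (if PySem.Set.equal (pvGrown grid comp) comp then comp
          else pvGrow grid fuel (pvGrown grid comp)) := by
      simp only [pvGrow]
    rw [hred]
    by_cases heq : PySem.Set.equal (pvGrown grid comp) comp = true
    · rw [if_pos heq]
      have hmemeq := (PySem.Set.equal_iff (pvGrown grid comp) comp).1 heq
      have hcover : ∀ x, pvReach grid s x → x ∈ comp := by
        intro x hx
        induction hx with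
        | refl => exact hseed
        | tail hr hadj ihx =>
          rename_i b c
          exact (hmemeq c).1 ((mem_pvGrown grid comp c).2
            (Or.inr ⟨b, ihx, hadj.2.2, hadj.2.1⟩))
      exact ⟨hnd, fun x => ⟨fun hx => hsub x hx,
        fun hx => hcover x ((mem_pvComp grid hs x).1 hx)⟩⟩
    · rw [if_neg heq]
      have hne : ∃ x, x ∈ pvGrown grid comp ∧ x ∉ comp := by
        by_contra hno
        push Not at hno
        exact heq ((PySem.Set.equal_iff _ _).2
          (fun x => ⟨fun hx => hno x hx, fun hx => hmono x hx⟩))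
      obtain ⟨w, hwg, hwc⟩ := hne
      have hss : pvComp grid s \ (pvGrown grid comp).toFinset ⊂ pvComp grid s \ comp.toFinset := by
        constructor
        · intro x hx
          rw [Finset.mem_sdiff] at hx ⊢
          exact ⟨hx.1, fun hmem => hx.2 (List.mem_toFinset.2 (hmono x (List.mem_toFinset.1 hmem)))⟩
        · intro hsub'
          have hw1 : w ∈ pvComp grid s \ comp.toFinset :=
            Finset.mem_sdiff.2 ⟨hgsub w hwg, fun h => hwc (List.mem_toFinset.1 h)⟩
          have := Finset.mem_sdiff.1 (hsub' hw1)
          exact this.2 (List.mem_toFinset.2 hwg)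
      have hcard := Finset.card_lt_card hss
      exact ih (pvGrown grid comp) (by omega)
        (PySem.Set.nodup_union comp _ hnd) hgsub (hmono s hseed)

-- the row-major scan order, flattened
def pvScanList (grid : List (List Int)) : List (Int × Int) :=
  (PySem.List.pyRange 1 ((grid.length : Int) - 1) 1).flatMap
    (fun r => (PySem.List.pyRange 0 (pvCols grid) 1).map (fun c => (r, c)))

-- one scan step of A (the inner lambda of the port, over a flattened cell)
def pvStepA (grid : List (List Int))
    (st : List (Int × Int) × PySem.Set (Int × Int)) (p : Int × Int) :
    List (Int × Int) × PySem.Set (Int × Int) :=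
  if pvCell grid p.1 p.2 = 9 ∧ ¬ (p ∈ st.2) then
    let bfs := pvBfs grid (((grid.length : Int) * pvCols grid).toNat + 1) [p]
        (PySem.Set.add st.2 p) []
    let component := bfs.1
    let n : Int := component.length
    let cx := PySem.Int.floordiv (component.map (fun p => p.1)).sum n
    let cy := PySem.Int.floordiv (component.map (fun p => p.2)).sum n
    (st.1 ++ [(cx, cy)], bfs.2)
  else st

-- one scan step of B
def pvStepB (grid : List (List Int))
    (st : List (Int × Int) × PySem.Set (Int × Int)) (p : Int × Int) :
    List (Int × Int) × PySem.Set (Int × Int) :=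
  if pvCell grid p.1 p.2 = 9 ∧ ¬ (p ∈ st.2) then
    let comp := pvGrow grid (((grid.length : Int) * pvCols grid).toNat + 1)
        (PySem.Set.add PySem.Set.empty p)
    let n : Int := PySem.Set.len comp
    let cx := PySem.Int.floordiv (comp.map (fun p => p.2)).sum n
    let cy := PySem.Int.floordiv (comp.map (fun p => p.1)).sum n
    (st.1 ++ [(cx, cy)], PySem.Set.union st.2 comp)
  else st

lemma pvFoldl_nested {σ : Type} (f : σ → Int × Int → σ) :
    ∀ (rs : List Int) (cs : List Int) (init : σ),
    rs.foldl (fun st r => cs.foldl (fun st c => f st (r, c)) st) init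
      = (rs.flatMap (fun r => cs.map (fun c => (r, c)))).foldl f init := by
  intro rs
  induction rs with
  | nil => intro cs init; simp
  | cons r rest ih =>
    intro cs init
    simp only [List.foldl_cons, List.flatMap_cons, List.foldl_append, List.foldl_map]
    exact ih cs _

lemma portA_eq (grid : List (List Int)) :
    find_color9_buttons_py grid = ((pvScanList grid).foldl (pvStepA grid) ([], PySem.Set.empty)).1 := by
  unfold find_color9_buttons_py pvScanList
  rw [← pvFoldl_nested]
  rfl

lemma portB_eq (grid : List (List Int)) :
    find_color9_buttons_py_alt grid = ((pvScanList grid).foldl (pvStepB grid) ([], PySem.Set.empty)).1 := by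
  unfold find_color9_buttons_py_alt pvScanList
  rw [← pvFoldl_nested]
  rfl

lemma pvCols_nonneg (grid : List (List Int)) : 0 ≤ pvCols grid := by
  unfold pvCols
  split
  · exact Int.natCast_nonneg _
  · exact le_refl 0

-- fuel bound: a component minus its seed is smaller than rows*cols
lemma pvCard_bound (grid : List (List Int)) {s : Int × Int} (hs : pvOk grid s) :
    (pvComp grid s \ ({s} : Finset (Int × Int))).card + 1 ≤
      ((grid.length : Int) * pvCols grid).toNat := by
  have hsubAll : ∀ x ∈ pvComp grid s, x ∈ pvAll grid :=
    fun x hx => (mem_pvAll grid x).2 (pvOk_of_mem_pvComp grid hx)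
  have h1 : (pvComp grid s).card ≤ (pvAll grid).card := Finset.card_le_card hsubAll
  have h2 : (pvAll grid).card ≤
      ((Finset.Icc (1 : Int) ((grid.length : Int) - 2)) ×ˢ
        (Finset.Icc (0 : Int) (pvCols grid - 1))).card := Finset.card_filter_le _ _
  rw [Finset.card_product, Int.card_Icc, Int.card_Icc] at h2
  have hC0 : 0 ≤ pvCols grid := pvCols_nonneg grid
  have hrw1 : ((grid.length : Int) - 2 + 1 - 1).toNat ≤ grid.length := by omega
  have hrw2 : (pvCols grid - 1 + 1 - 0).toNat = (pvCols grid).toNat := by omega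
  have h3 : (pvAll grid).card ≤ grid.length * (pvCols grid).toNat := by
    calc (pvAll grid).card ≤ _ := h2
      _ ≤ grid.length * (pvCols grid).toNat := by
          rw [hrw2]; exact Nat.mul_le_mul hrw1 (le_refl _)
  have hmemS : s ∈ pvComp grid s := self_mem_pvComp grid hs
  have hsint : ({s} : Finset (Int × Int)) ∩ pvComp grid s = {s} :=
    Finset.inter_eq_left.2 (Finset.singleton_subset_iff.2 hmemS)
  have hcards : (pvComp grid s \ {s}).card = (pvComp grid s).card - 1 := by
    rw [Finset.card_sdiff, hsint, Finset.card_singleton]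
  have hge1 : 1 ≤ (pvComp grid s).card := Finset.card_pos.2 ⟨s, hmemS⟩
  have htn : ((grid.length : Int) * pvCols grid).toNat = grid.length * (pvCols grid).toNat := by
    rw [show (grid.length : Int) * pvCols grid =
        ((grid.length * (pvCols grid).toNat : Nat) : Int) by push_cast; rw [Int.toNat_of_nonneg hC0]]
    exact Int.toNat_natCast _
  omega

-- the scan invariant: both ports walk the same cells with set-equal visited states
lemma pvScan_invariant (grid : List (List Int)) :
    ∀ (cells : List (Int × Int)) (b : List (Int × Int)) (VA VB : PySem.Set (Int × Int))
      (S : Finset (Int × Int)),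
    (∀ p ∈ cells, 1 ≤ p.1 ∧ p.1 < (grid.length : Int) - 1 ∧ 0 ≤ p.2 ∧ p.2 < pvCols grid) →
    (∀ x, x ∈ VA ↔ x ∈ S) → (∀ x, x ∈ VB ↔ x ∈ S) →
    (∀ x ∈ S, pvOk grid x ∧ ∀ y, pvReach grid x y → y ∈ S) →
    (cells.foldl (pvStepA grid) (b, VA)).1 = (cells.foldl (pvStepB grid) (b, VB)).1 := by
  intro cells
  induction cells with
  | nil => intro b VA VB S _ _ _ _; rfl
  | cons p rest ih =>
    intro b VA VB S hb hVA hVB hS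
    have hbrest := fun q hq => hb q (List.mem_cons_of_mem _ hq)
    rw [List.foldl_cons, List.foldl_cons]
    by_cases hcell : pvCell grid p.1 p.2 = 9
    · by_cases hmem : p ∈ S
      · -- already seen: both steps do nothing
        have ha : pvStepA grid (b, VA) p = (b, VA) := by
          unfold pvStepA
          rw [if_neg (fun h => h.2 ((hVA p).2 hmem))]
        have hb' : pvStepB grid (b, VB) p = (b, VB) := by
          unfold pvStepB
          rw [if_neg (fun h => h.2 ((hVB p).2 hmem))]
        rw [ha, hb']
        exact ih b VA VB S hbrest hVA hVB hS
      · -- a fresh component is found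
        obtain ⟨hb1, hb2, hb3, hb4⟩ := hb p (List.mem_cons_self ..)
        have hpok : pvOk grid p := ⟨hb1, hb2, hb3, hb4, hcell⟩
        have hAddE : PySem.Set.add (PySem.Set.empty : PySem.Set (Int × Int)) p = [p] := by
          have hne : p ∉ (PySem.Set.empty : PySem.Set (Int × Int)) := by
            simp [PySem.Set.empty]
          rw [PySem.Set.add_of_not_mem hne]
          rfl
        have hfuel0 := pvCard_bound grid hpok
        -- A: run the BFS invariant
        obtain ⟨hAnd, hAset, hAV⟩ := pvBfs_invariant grid p (fun x => x ∈ S) hpok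
          (((grid.length : Int) * pvCols grid).toNat + 1) [p] (PySem.Set.add VA p) []
          (by simpa using by omega)
          (by intro q hq; simp at hq; subst hq; exact self_mem_pvComp grid hpok)
          (by simp)
          (by simp)
          (by intro x
              rw [PySem.Set.mem_add, hVA x]
              simp)
          (by intro x hx hxS
              exact hmem ((hS x hxS).2 p (pvReach_symm grid ((mem_pvComp grid hpok x).1 hx))))
          (by simp)
          (by simp)
        -- B: run the fixpoint invariant
        obtain ⟨hBnd, hBmem⟩ := pvGrow_invariant grid p hpok
          (((grid.length : Int) * pvCols grid).toNat + 1) (PySem.Set.add PySem.Set.empty p)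
          (by rw [hAddE]; simpa using by omega)
          (by rw [hAddE]; simp)
          (by rw [hAddE]; intro q hq; simp at hq; subst hq; exact self_mem_pvComp grid hpok)
          (by rw [hAddE]; simp)
        set LA := (pvBfs grid (((grid.length : Int) * pvCols grid).toNat + 1) [p]
          (PySem.Set.add VA p) []).1 with hLA
        set RB := pvGrow grid (((grid.length : Int) * pvCols grid).toNat + 1)
          (PySem.Set.add PySem.Set.empty p) with hRB
        have hRBfin : RB.toFinset = pvComp grid p :=
          Finset.ext fun x => by rw [List.mem_toFinset, hBmem x]
        have hperm : RB.Perm (LA.map pvSw) :=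
          List.perm_of_nodup_nodup_toFinset_eq hBnd hAnd (hRBfin.trans hAset.symm)
        have hsum1 : (RB.map (fun q => q.2)).sum = ((LA.map (fun q => q.1)).sum) := by
          rw [(hperm.map (fun q => q.2)).sum_eq, List.map_map,
            show ((fun q : Int × Int => q.2) ∘ pvSw) = (fun q : Int × Int => q.1) from rfl]
        have hsum2 : (RB.map (fun q => q.1)).sum = ((LA.map (fun q => q.2)).sum) := by
          rw [(hperm.map (fun q => q.1)).sum_eq, List.map_map,
            show ((fun q : Int × Int => q.1) ∘ pvSw) = (fun q : Int × Int => q.2) from rfl]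
        have hlen : RB.length = LA.length := by
          rw [hperm.length_eq, List.length_map]
        have hn : PySem.Set.len RB = (LA.length : Int) := by
          simp [PySem.Set.len, hlen]
        -- both append the same centroid
        have ha : pvStepA grid (b, VA) p =
            (b ++ [(PySem.Int.floordiv (LA.map (fun q => q.1)).sum (LA.length : Int),
                    PySem.Int.floordiv (LA.map (fun q => q.2)).sum (LA.length : Int))],
             (pvBfs grid (((grid.length : Int) * pvCols grid).toNat + 1) [p]
               (PySem.Set.add VA p) []).2) := by
          unfold pvStepA
          rw [if_pos ⟨hcell, fun h => hmem ((hVA p).1 h)⟩]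
        have hbv : pvStepB grid (b, VB) p =
            (b ++ [(PySem.Int.floordiv (LA.map (fun q => q.1)).sum (LA.length : Int),
                    PySem.Int.floordiv (LA.map (fun q => q.2)).sum (LA.length : Int))],
             PySem.Set.union VB RB) := by
          unfold pvStepB
          rw [if_pos ⟨hcell, fun h => hmem ((hVB p).1 h)⟩]
          show (b ++ [(PySem.Int.floordiv (RB.map (fun q => q.2)).sum (PySem.Set.len RB),
                       PySem.Int.floordiv (RB.map (fun q => q.1)).sum (PySem.Set.len RB))],
                PySem.Set.union VB RB) = _
          rw [hn, hsum1, hsum2]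
        rw [ha, hbv]
        exact ih _ _ _ (S ∪ pvComp grid p) hbrest
          (fun x => by rw [hAV x, Finset.mem_union])
          (fun x => by rw [PySem.Set.mem_union, hVB x, hBmem x, Finset.mem_union])
          (by intro x hx
              rcases Finset.mem_union.1 hx with h | h
              · exact ⟨(hS x h).1, fun y hy => Finset.mem_union_left _ ((hS x h).2 y hy)⟩
              · refine ⟨pvOk_of_mem_pvComp grid h, fun y hy => Finset.mem_union_right _ ?_⟩
                exact (mem_pvComp grid hpok y).2
                  (Relation.ReflTransGen.trans ((mem_pvComp grid hpok x).1 h) hy))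
    · -- not a colour-9 cell: both steps do nothing
      have ha : pvStepA grid (b, VA) p = (b, VA) := by
        unfold pvStepA
        rw [if_neg (fun h => hcell h.1)]
      have hb' : pvStepB grid (b, VB) p = (b, VB) := by
        unfold pvStepB
        rw [if_neg (fun h => hcell h.1)]
      rw [ha, hb']
      exact ih b VA VB S hbrest hVA hVB hS

-- ===== VERDICT (by name: the statement is the Claim_ definition above) =====
theorem find_color9_buttons_py_spec : Claim_equal_find_color9_buttons_py := by
  intro grid _ _
  unfold Spec_find_color9_buttons_py
  rw [portA_eq, portB_eq]
  refine pvScan_invariant grid (pvScanList grid) [] PySem.Set.empty PySem.Set.empty ∅ ?_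
    (by simp [PySem.Set.empty]) (by simp [PySem.Set.empty]) (by simp)
  intro q hq
  unfold pvScanList at hq
  rw [List.mem_flatMap] at hq
  obtain ⟨r, hr, hq2⟩ := hq
  rw [List.mem_map] at hq2
  obtain ⟨c, hc, rfl⟩ := hq2
  rw [PySem.List.mem_pyRange_one] at hr hc
  exact ⟨hr.1, hr.2, hc.1, hc.2⟩
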